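-- pv_equiv track=rewrite | github.com/tolgazorlu/CodePractices | day1/day1_part2.py | check
-- ===== SOURCE A (Python) =====
-- def check(arr):
--     maxNumber = 0
--     for i in range(len(arr) - 3):
--         for j in range(i,(len(arr) - 2)):
--             for k in range(j,(len(arr) - 1)):
--                 if((arr[i] + arr[j] + arr[k] == 2020) and ((arr[i] * arr[j] * arr[k]) > maxNumber)):
--                     maxNumber = arr[i] * arr[j] * arr[k]
--
--     return maxNumber
-- ===== SOURCE B (Python) =====
-- def check(arr):
--     n = len(arr)
--     maxidx = {}
--     for k in range(n - 1):
--         maxidx[arr[k]] = k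
--     best = 0
--     for i in range(n - 3):
--         for j in range(i, n - 2):
--             t = 2020 - arr[i] - arr[j]
--             k = maxidx.get(t, -1)
--             if k >= j:
--                 p = arr[i] * arr[j] * t
--                 if p > best:
--                     best = p
--     return best
-- ===== Notes on version B (the rewrite author's own statement) =====
-- stated objective: faster
-- what changed: replaced the innermost scan over k by a dict mapping each value to its greatest eligible index, built once, so each (i,j) pair does an O(1) lookup instead of an O(n) scan
import Mathlib
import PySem

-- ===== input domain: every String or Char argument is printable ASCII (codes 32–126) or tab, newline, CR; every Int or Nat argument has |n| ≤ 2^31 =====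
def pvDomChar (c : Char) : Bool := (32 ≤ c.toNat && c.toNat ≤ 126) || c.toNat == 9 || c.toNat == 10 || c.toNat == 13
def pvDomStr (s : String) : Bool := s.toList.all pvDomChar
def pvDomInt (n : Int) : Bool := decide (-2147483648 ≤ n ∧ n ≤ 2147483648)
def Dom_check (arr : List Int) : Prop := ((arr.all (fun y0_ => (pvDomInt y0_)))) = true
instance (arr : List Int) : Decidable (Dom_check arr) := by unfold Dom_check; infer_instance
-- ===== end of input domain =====

-- B replaces A's innermost scan over k by a one-pass dict value → greatest index < n-1, making the pair loop O(1) per pair (faster, asymptotic).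

-- ===== PORT A =====
-- indices i, j, k produced by the ranges are always in bounds, so pyGetD with default 0 is exact
def check (arr : List Int) : Int :=
  (PySem.List.pyRange 0 ((arr.length : Int) - 3) 1).foldl (fun m i =>
    (PySem.List.pyRange i ((arr.length : Int) - 2) 1).foldl (fun m j =>
      (PySem.List.pyRange j ((arr.length : Int) - 1) 1).foldl (fun m k =>
        if PySem.List.pyGetD arr i 0 + PySem.List.pyGetD arr j 0 + PySem.List.pyGetD arr k 0 = 2020
           ∧ PySem.List.pyGetD arr i 0 * PySem.List.pyGetD arr j 0 * PySem.List.pyGetD arr k 0 > m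
        then PySem.List.pyGetD arr i 0 * PySem.List.pyGetD arr j 0 * PySem.List.pyGetD arr k 0
        else m) m) m) 0

-- ===== PORT B =====
def check_alt (arr : List Int) : Int :=
  let n : Int := arr.length
  let maxidx : PySem.Dict Int Int :=
    (PySem.List.pyRange 0 (n - 1) 1).foldl
      (fun d k => d.insert (PySem.List.pyGetD arr k 0) k) PySem.Dict.empty
  (PySem.List.pyRange 0 (n - 3) 1).foldl (fun best i =>
    (PySem.List.pyRange i (n - 2) 1).foldl (fun best j =>
      let t := 2020 - PySem.List.pyGetD arr i 0 - PySem.List.pyGetD arr j 0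
      let k := maxidx.getD t (-1)
      if k ≥ j then
        let p := PySem.List.pyGetD arr i 0 * PySem.List.pyGetD arr j 0 * t
        if p > best then p else best
      else best) best) 0

-- ===== PRECONDITION & SPEC =====
def Spec_check (arr : List Int) (out : Int) : Prop := out = check_alt arr
instance (arr : List Int) (out : Int) : Decidable (Spec_check arr out) := by unfold Spec_check; infer_instance

-- ===== CLAIM (what is proved, stated in full; the proofs are below) =====
def Claim_equal_check : Prop := ∀ (arr : List Int), Dom_check arr → Spec_check arr (check arr)

-- ===== LEMMAS AND PROOFS =====

-- A's innermost k-loop over an arbitrary index list L collapses to one conditional update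
lemma innerA (arr : List Int) (x y : Int) (L : List Int) : ∀ m : Int,
    L.foldl (fun m k =>
        if x + y + PySem.List.pyGetD arr k 0 = 2020
           ∧ x * y * PySem.List.pyGetD arr k 0 > m
        then x * y * PySem.List.pyGetD arr k 0 else m) m
      = if (∃ k ∈ L, PySem.List.pyGetD arr k 0 = 2020 - x - y)
           ∧ x * y * (2020 - x - y) > m
        then x * y * (2020 - x - y) else m := by
  induction L with
  | nil => intro m; simp
  | cons a L ih =>
    intro m
    simp only [List.foldl_cons]
    by_cases ha : PySem.List.pyGetD arr a 0 = 2020 - x - y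
    · have hc : x + y + PySem.List.pyGetD arr a 0 = 2020 := by omega
      rw [ha]
      by_cases hp : x * y * (2020 - x - y) > m
      · rw [if_pos ⟨by omega, hp⟩, ih]
        rw [if_neg (by intro h; exact absurd h.2 (lt_irrefl _))]
        rw [if_pos ⟨⟨a, List.mem_cons_self, ha⟩, hp⟩]
      · rw [if_neg (by intro h; exact hp h.2), ih]
        by_cases he : ∃ k ∈ L, PySem.List.pyGetD arr k 0 = 2020 - x - y
        · rw [if_neg (by intro h; exact hp h.2), if_neg (by intro h; exact hp h.2)]
        · rw [if_neg (by intro h; exact he h.1), if_neg (by intro h; exact hp h.2)]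
    · have hc : ¬(x + y + PySem.List.pyGetD arr a 0 = 2020
          ∧ x * y * PySem.List.pyGetD arr a 0 > m) := by
        intro h; exact ha (by omega)
      rw [if_neg hc, ih]
      by_cases he : ∃ k ∈ L, PySem.List.pyGetD arr k 0 = 2020 - x - y
      · have : ∃ k ∈ a :: L, PySem.List.pyGetD arr k 0 = 2020 - x - y := by
          obtain ⟨k, hk, h⟩ := he; exact ⟨k, List.mem_cons_of_mem _ hk, h⟩
        by_cases hp : x * y * (2020 - x - y) > m
        · rw [if_pos ⟨he, hp⟩, if_pos ⟨this, hp⟩]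
        · rw [if_neg (by intro h; exact hp h.2), if_neg (by intro h; exact hp h.2)]
      · rw [if_neg (by intro h; exact he h.1)]
        rw [if_neg (by
          intro h
          obtain ⟨⟨k, hk, hkk⟩, _⟩ := h
          rcases List.mem_cons.mp hk with rfl | hk
          · exact ha hkk
          · exact he ⟨k, hk, hkk⟩)]

-- the insert-loop dict: its lookup is the last (= greatest, for an increasing list) matching index
lemma dict_spec (arr : List Int) (t : Int) (L : List Int) (hL : L.Pairwise (· < ·)) :
    ∀ d0 : PySem.Dict Int Int,
      (if ∃ k ∈ L, PySem.List.pyGetD arr k 0 = t then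
        (L.foldl (fun d k => d.insert (PySem.List.pyGetD arr k 0) k) d0).getD t (-1) ∈ L
        ∧ PySem.List.pyGetD arr ((L.foldl (fun d k => d.insert (PySem.List.pyGetD arr k 0) k) d0).getD t (-1)) 0 = t
        ∧ ∀ k ∈ L, PySem.List.pyGetD arr k 0 = t
            → k ≤ (L.foldl (fun d k => d.insert (PySem.List.pyGetD arr k 0) k) d0).getD t (-1)
      else (L.foldl (fun d k => d.insert (PySem.List.pyGetD arr k 0) k) d0).getD t (-1) = d0.getD t (-1)) := by
  induction L with
  | nil => intro d0; simp
  | cons a L ih =>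
    intro d0
    have hL' : L.Pairwise (· < ·) := hL.tail
    have ha : ∀ k ∈ L, a < k := fun k hk => List.rel_of_pairwise_cons hL hk
    have ih' := ih hL' (d0.insert (PySem.List.pyGetD arr a 0) a)
    simp only [List.foldl_cons] at *
    by_cases he : ∃ k ∈ L, PySem.List.pyGetD arr k 0 = t
    · rw [if_pos he] at ih'
      obtain ⟨hmem, hval, hmax⟩ := ih'
      rw [if_pos (by obtain ⟨k, hk, hh⟩ := he; exact ⟨k, List.mem_cons_of_mem _ hk, hh⟩)]
      refine ⟨List.mem_cons_of_mem _ hmem, hval, ?_⟩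
      intro k hk hkt
      rcases List.mem_cons.mp hk with rfl | hk
      · exact le_of_lt (ha _ hmem)
      · exact hmax k hk hkt
    · rw [if_neg he] at ih'
      by_cases hat : PySem.List.pyGetD arr a 0 = t
      · rw [if_pos ⟨a, List.mem_cons_self, hat⟩, ih']
        rw [hat, PySem.Dict.getD_insert]
        rw [if_pos rfl]
        refine ⟨List.mem_cons_self, hat, ?_⟩
        intro k hk hkt
        rcases List.mem_cons.mp hk with rfl | hk
        · exact le_refl _
        · exact absurd ⟨k, hk, hkt⟩ he
      · rw [if_neg (by
          intro h
          obtain ⟨k, hk, hkt⟩ := h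
          rcases List.mem_cons.mp hk with rfl | hk
          · exact hat hkt
          · exact he ⟨k, hk, hkt⟩)]
        rw [ih', PySem.Dict.getD_insert, if_neg (by intro h; exact hat h.symm)]

-- existence of a matching k ≥ j in [0, n-1) ↔ the dict lookup is ≥ j (for 0 ≤ j)
lemma lookup_iff (arr : List Int) (t j : Int) (hj : 0 ≤ j) :
    ((PySem.List.pyRange 0 ((arr.length : Int) - 1) 1).foldl
        (fun d k => d.insert (PySem.List.pyGetD arr k 0) k) PySem.Dict.empty).getD t (-1) ≥ j
      ↔ ∃ k ∈ PySem.List.pyRange j ((arr.length : Int) - 1) 1, PySem.List.pyGetD arr k 0 = t := by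
  have hs := dict_spec arr t (PySem.List.pyRange 0 ((arr.length : Int) - 1) 1)
    (PySem.List.pairwise_lt_pyRange_one 0 _) PySem.Dict.empty
  set v := ((PySem.List.pyRange 0 ((arr.length : Int) - 1) 1).foldl
      (fun d k => d.insert (PySem.List.pyGetD arr k 0) k) PySem.Dict.empty).getD t (-1) with hv
  by_cases he : ∃ k ∈ PySem.List.pyRange 0 ((arr.length : Int) - 1) 1, PySem.List.pyGetD arr k 0 = t
  · rw [if_pos he] at hs
    obtain ⟨hmem, hval, hmax⟩ := hs
    constructor
    · intro hge
      refine ⟨v, ?_, hval⟩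
      rw [PySem.List.mem_pyRange_one] at hmem ⊢
      exact ⟨hge, hmem.2⟩
    · rintro ⟨k, hk, hkt⟩
      rw [PySem.List.mem_pyRange_one] at hk
      have : k ≤ v := hmax k (by rw [PySem.List.mem_pyRange_one]; exact ⟨by omega, hk.2⟩) hkt
      omega
  · rw [if_neg he] at hs
    rw [hs]
    simp only [PySem.Dict.getD_empty]
    constructor
    · intro h; omega
    · rintro ⟨k, hk, hkt⟩
      rw [PySem.List.mem_pyRange_one] at hk
      exact absurd ⟨k, by rw [PySem.List.mem_pyRange_one]; exact ⟨by omega, hk.2⟩, hkt⟩ he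

-- ===== VERDICT (by name: the statement is the Claim_ definition above) =====
theorem check_spec : Claim_equal_check := by
  intro arr _
  unfold Spec_check check check_alt
  simp only []
  apply PySem.List.foldl_congr_mem
  intro m i hi
  apply PySem.List.foldl_congr_mem
  intro m j hj
  rw [PySem.List.mem_pyRange_one] at hi hj
  have hj0 : 0 ≤ j := by omega
  rw [innerA arr (PySem.List.pyGetD arr i 0) (PySem.List.pyGetD arr j 0)]
  set v := ((PySem.List.pyRange 0 ((arr.length : Int) - 1) 1).foldl
      (fun d k => d.insert (PySem.List.pyGetD arr k 0) k) PySem.Dict.empty).getD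
      (2020 - PySem.List.pyGetD arr i 0 - PySem.List.pyGetD arr j 0) (-1) with hv
  have hiff := lookup_iff arr (2020 - PySem.List.pyGetD arr i 0 - PySem.List.pyGetD arr j 0) j hj0
  rw [← hv] at hiff
  by_cases hge : v ≥ j
  · have he := hiff.mp hge
    by_cases hpm : PySem.List.pyGetD arr i 0 * PySem.List.pyGetD arr j 0
        * (2020 - PySem.List.pyGetD arr i 0 - PySem.List.pyGetD arr j 0) > m
    · rw [if_pos ⟨he, hpm⟩, if_pos hge, if_pos hpm]
    · rw [if_neg (fun h => hpm h.2), if_pos hge, if_neg hpm]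
  · have he : ¬∃ k ∈ PySem.List.pyRange j ((arr.length : Int) - 1) 1,
        PySem.List.pyGetD arr k 0 = 2020 - PySem.List.pyGetD arr i 0 - PySem.List.pyGetD arr j 0 :=
      fun h => hge (hiff.mpr h)
    rw [if_neg (fun h => he h.1), if_neg hge]
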